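-- pv_equiv track=rewrite | github.com/yadavanuj/bond-apis | src/modules/base64_helpers.py | find_base64_like_spans
-- ===== SOURCE A (Python) =====
-- from typing import Tuple, List
--
-- BASE64_CHARS = set("ABCDEFGHIJKLMNOPQRSTUVWXYZabcdefghijklmnopqrstuvwxyz0123456789+/=")
--
-- def find_base64_like_spans(text: str, min_len: int = 8) -> List[Tuple[int, int]]:
--     """
--     Finds spans of text that consist only of Base64 characters.
--     This is a FAST lexical scan (O(n)), not decoding.
--     """
--     spans = []
--     start = None
--
--     for i, ch in enumerate(text):
--         if ch in BASE64_CHARS: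
--             if start is None:
--                 start = i
--         else:
--             if start is not None and (i - start) >= min_len:
--                 spans.append((start, i))
--             start = None
--
--     if start is not None and (len(text) - start) >= min_len:
--         spans.append((start, len(text)))
--
--     return spans
-- ===== SOURCE B (Python) =====
-- BASE64_CHARS = set("ABCDEFGHIJKLMNOPQRSTUVWXYZabcdefghijklmnopqrstuvwxyz0123456789+/=")
--
-- def find_base64_like_spans(text, min_len=8):
--     """Run-skipping scan: on hitting a base64 char, scan the whole maximal
--     run at once and emit it if long enough; no Optional start bookkeeping,
--     no post-loop flush."""
--     spans = []
--     n = len(text)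
--     i = 0
--     while i < n:
--         if text[i] in BASE64_CHARS:
--             j = i + 1
--             while j < n and text[j] in BASE64_CHARS:
--                 j += 1
--             if j - i >= min_len:
--                 spans.append((i, j))
--             i = j
--         else:
--             i += 1
--     return spans
-- ===== Notes on version B (the rewrite author's own statement) =====
-- stated objective: simpler
-- what changed: Replaced the per-character Optional-start state machine with its post-loop flush by a run-skipping two-level scan that consumes each maximal base64 run atomically and emits its span inline.
import Mathlib
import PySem

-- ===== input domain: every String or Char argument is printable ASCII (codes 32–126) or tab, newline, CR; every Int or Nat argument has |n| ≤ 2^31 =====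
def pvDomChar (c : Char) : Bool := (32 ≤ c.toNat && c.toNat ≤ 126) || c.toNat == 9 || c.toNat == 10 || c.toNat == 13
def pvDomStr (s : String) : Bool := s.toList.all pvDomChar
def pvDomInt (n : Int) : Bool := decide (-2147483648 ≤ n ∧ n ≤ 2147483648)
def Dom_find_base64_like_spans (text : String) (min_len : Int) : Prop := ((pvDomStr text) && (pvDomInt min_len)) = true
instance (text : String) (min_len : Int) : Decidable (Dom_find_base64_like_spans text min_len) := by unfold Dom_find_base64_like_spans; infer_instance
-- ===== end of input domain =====

-- B replaces A's Optional-start state machine (with its post-loop flush) by a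
-- run-skipping scan that consumes each maximal base64 run atomically; simpler, same O(n).

-- shared character set (the module constant BASE64_CHARS)
def pvB64chars : List Char :=
  "ABCDEFGHIJKLMNOPQRSTUVWXYZabcdefghijklmnopqrstuvwxyz0123456789+/=".toList
def pvIsB64 (c : Char) : Bool := pvB64chars.contains c

-- ===== PORT A =====
-- the `for i, ch in enumerate(text)` loop: state = (spans, start)
def pvALoop (min_len : Int) : List Char → Nat → List (Int × Int) → Option Nat →
    List (Int × Int) × Option Nat
  | [], _, spans, start => (spans, start)
  | c :: cs, i, spans, start =>
    if pvIsB64 c then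
      pvALoop min_len cs (i + 1) spans (some (start.getD i))
    else
      pvALoop min_len cs (i + 1)
        (match start with
         | some s => if min_len ≤ (i : Int) - (s : Int) then spans ++ [((s : Int), (i : Int))] else spans
         | none => spans) none

def find_base64_like_spans (text : String) (min_len : Int) : List (Int × Int) :=
  -- run the loop, then the post-loop flush with len(text)
  match pvALoop min_len text.toList 0 [] none with
  | (spans, some s) =>
      if min_len ≤ (text.toList.length : Int) - (s : Int) then spans ++ [((s : Int), (text.toList.length : Int))] else spans
  | (spans, none) => spans

-- ===== PORT B =====
-- Source B's run-skipping scan: the inner `while` is takeWhile/dropWhile on the rest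
def pvBRuns (min_len : Int) : List Char → Nat → List (Int × Int)
  | [], _ => []
  | c :: cs, i =>
    if pvIsB64 c then
      let j := i + 1 + (cs.takeWhile pvIsB64).length
      (if min_len ≤ (j : Int) - (i : Int) then [((i : Int), (j : Int))] else []) ++
        pvBRuns min_len (cs.dropWhile pvIsB64) j
    else
      pvBRuns min_len cs (i + 1)
  termination_by cs => cs.length
  decreasing_by
  · simpa using Nat.lt_succ_of_le (List.length_dropWhile_le _ _)
  · simp

def find_base64_like_spans_alt (text : String) (min_len : Int) : List (Int × Int) :=
  pvBRuns min_len text.toList 0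

-- ===== PRECONDITION & SPEC =====
def Spec_find_base64_like_spans (text : String) (min_len : Int) (out : List (Int × Int)) : Prop := out = find_base64_like_spans_alt text min_len
instance (text : String) (min_len : Int) (out : List (Int × Int)) : Decidable (Spec_find_base64_like_spans text min_len out) := by unfold Spec_find_base64_like_spans; infer_instance

-- ===== CLAIM (what is proved, stated in full; the proofs are below) =====
def Claim_equal_find_base64_like_spans : Prop := ∀ (text : String) (min_len : Int), Dom_find_base64_like_spans text min_len → Spec_find_base64_like_spans text min_len (find_base64_like_spans text min_len)

-- ===== LEMMAS AND PROOFS =====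

-- apply the post-loop flush, given the total length n of the text
def pvFinish (m : Int) (n : Nat) : List (Int × Int) × Option Nat → List (Int × Int)
  | (spans, some s) => if m ≤ (n : Int) - (s : Int) then spans ++ [((s : Int), (n : Int))] else spans
  | (spans, none) => spans

-- while A is inside a run started at s, the run ends at i + |takeWhile|, and the
-- loop continues on the dropWhile suffix with the (conditionally) flushed span appended
theorem pvA_run (m : Int) (s : Nat) :
    ∀ (cs : List Char) (i : Nat) (spans : List (Int × Int)),
      pvFinish m (i + cs.length) (pvALoop m cs i spans (some s)) =
      pvFinish m ((i + (cs.takeWhile pvIsB64).length) + (cs.dropWhile pvIsB64).length)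
        (pvALoop m (cs.dropWhile pvIsB64) (i + (cs.takeWhile pvIsB64).length)
          (spans ++ (if m ≤ ((i + (cs.takeWhile pvIsB64).length : Nat) : Int) - (s : Int)
                     then [((s : Int), ((i + (cs.takeWhile pvIsB64).length : Nat) : Int))] else [])) none) := by
  intro cs
  induction cs with
  | nil =>
      intro i spans
      simp [pvALoop, pvFinish]
      split <;> simp
  | cons c cs ih =>
      intro i spans
      by_cases hc : pvIsB64 c
      · rw [show pvALoop m (c :: cs) i spans (some s)
              = pvALoop m cs (i + 1) spans (some s) by simp [pvALoop, hc]]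
        rw [show (i + (c :: cs).length) = (i + 1) + cs.length by simp; omega]
        rw [ih (i + 1) spans]
        simp [hc]
        ring_nf
      · simp only [List.takeWhile_cons, List.dropWhile_cons, hc, if_neg, Bool.false_eq_true,
          not_false_eq_true, List.length_nil, Nat.add_zero]
        rw [show pvALoop m (c :: cs) i spans (some s)
              = pvALoop m cs (i + 1) (if m ≤ (i : Int) - (s : Int) then spans ++ [((s : Int), (i : Int))] else spans) none
            by simp [pvALoop, hc]]
        rw [show pvALoop m (c :: cs) i (spans ++ (if m ≤ ((i : Nat) : Int) - (s : Int) then [((s : Int), ((i : Nat) : Int))] else [])) none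
              = pvALoop m cs (i + 1) (spans ++ (if m ≤ ((i : Nat) : Int) - (s : Int) then [((s : Int), ((i : Nat) : Int))] else [])) none
            by simp [pvALoop, hc]]
        have : (if m ≤ (i : Int) - (s : Int) then spans ++ [((s : Int), (i : Int))] else spans)
             = spans ++ (if m ≤ (i : Int) - (s : Int) then [((s : Int), (i : Int))] else []) := by
          split <;> simp
        rw [this]

-- main invariant: A's loop from the empty-run state, flushed at the end,
-- equals spans ++ B's run list
theorem pvAB (m : Int) :
    ∀ (cs : List Char) (i : Nat) (spans : List (Int × Int)),
      pvFinish m (i + cs.length) (pvALoop m cs i spans none) =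
      spans ++ pvBRuns m cs i := by
  intro cs i
  fun_induction pvBRuns m cs i with
  | case1 => intro spans; simp [pvALoop, pvFinish]
  | case2 c cs i hc j ih =>
      intro spans
      rw [show pvALoop m (c :: cs) i spans none
            = pvALoop m cs (i + 1) spans (some i) by simp [pvALoop, hc]]
      rw [show (i + (c :: cs).length) = (i + 1) + cs.length by simp; omega]
      rw [pvA_run m i cs (i + 1) spans]
      rw [ih]
      exact List.append_assoc _ _ _
  | case3 c cs i hc ih =>
      intro spans
      rw [show pvALoop m (c :: cs) i spans none
            = pvALoop m cs (i + 1) spans none by simp [pvALoop, hc]]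
      rw [show (i + (c :: cs).length) = (i + 1) + cs.length by simp; omega]
      exact ih spans

-- ===== VERDICT (by name: the statement is the Claim_ definition above) =====
theorem find_base64_like_spans_spec : Claim_equal_find_base64_like_spans := by
  intro text min_len _
  unfold Spec_find_base64_like_spans find_base64_like_spans find_base64_like_spans_alt
  have h := pvAB min_len text.toList 0 []
  simp only [Nat.zero_add, List.nil_append] at h
  rw [← h]
  generalize pvALoop min_len text.toList 0 [] none = r
  rcases r with ⟨spans, start⟩
  cases start <;> simp [pvFinish]
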